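-- pv_equiv track=rewrite | github.com/dharmveer18/SchoolManagement | Hackerank.py | maximumClusterQuality
-- ===== SOURCE A (Python) =====
-- def maximumClusterQuality(speed, reliability, maxMachines):
--     rel = sorted(reliability, reverse =True)
--     total,product, res, full_res = 0, 1, 0, 0
--
--     for i in range(maxMachines):
--         total, res =0,0
--         total= reliability[reliability.index(rel[i])]
--         res = total* rel[i]
--         if full_res < res:
--             full_res = res
--         res =0
--         for j in range(i+1, maxMachines):
--             total = reliability[reliability.index(rel[j])]
--             res = total* min(rel[:j])
--             if full_res < res:
--                 full_res = res
--     return full_res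
-- ===== SOURCE B (Python) =====
-- def maximumClusterQuality(speed, reliability, maxMachines):
--     if maxMachines <= 0:
--         return 0
--     best = 0
--     for r in sorted(reliability, reverse=True)[:maxMachines]:
--         best = max(best, r * r)
--     return best
-- ===== Notes on version B (the rewrite author's own statement) =====
-- stated objective: faster
-- what changed: Replaces the O(k^2) double loop with list.index rescans and min-of-prefix recomputation by a single pass taking the max square over the k largest reliabilities (every cross product rel[j]*min(rel[:j]) is dominated by one of those squares).
-- crash fix: When maxMachines > len(reliability) A raises IndexError on rel[i]; B returns the max square over all reliabilities (0 if the list is empty). — e.g. on maximumClusterQuality([], [2, -3], 5): A raises IndexError, B returns 9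
import Mathlib
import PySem

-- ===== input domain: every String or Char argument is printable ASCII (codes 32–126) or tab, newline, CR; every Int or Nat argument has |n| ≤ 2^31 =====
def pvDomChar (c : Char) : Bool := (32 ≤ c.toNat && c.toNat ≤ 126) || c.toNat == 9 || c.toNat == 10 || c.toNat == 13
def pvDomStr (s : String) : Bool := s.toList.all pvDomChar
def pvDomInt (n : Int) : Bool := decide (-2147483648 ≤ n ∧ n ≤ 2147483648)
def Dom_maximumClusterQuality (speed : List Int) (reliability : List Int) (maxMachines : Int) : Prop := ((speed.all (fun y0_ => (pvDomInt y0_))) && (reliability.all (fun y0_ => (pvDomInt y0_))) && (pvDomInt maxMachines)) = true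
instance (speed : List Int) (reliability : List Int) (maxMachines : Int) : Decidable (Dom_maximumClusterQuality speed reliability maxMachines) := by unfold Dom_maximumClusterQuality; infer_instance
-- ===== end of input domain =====

-- B replaces A's double loop (with list.index rescans and min-of-prefix recomputation) by one
-- max-of-squares pass over the maxMachines largest reliabilities; equal wherever A returns
-- (Pre_: maxMachines ≤ len(reliability)); outside Pre_ A raises IndexError and B still returns.


-- ===== PORT A =====
-- total = reliability[reliability.index(rel[i])]; indices valid under Pre_, so the pyGetD defaults are never hit
def pvFetchA (reliability rel : List Int) (i : Int) : Int :=
  PySem.List.pyGetD reliability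
    (((PySem.List.index? reliability (PySem.List.pyGetD rel i 0)).getD 0 : Nat) : Int) 0

def maximumClusterQuality (speed : List Int) (reliability : List Int) (maxMachines : Int) : Int :=
  let rel := PySem.List.sorted reliability (fun x => x) true
  -- total and res are re-assigned before every use and product is never used: full_res is the only live loop state
  (PySem.List.pyRange 0 maxMachines 1).foldl
    (fun full_res i =>
      let total := pvFetchA reliability rel i
      let res := total * PySem.List.pyGetD rel i 0
      let full_res := if full_res < res then res else full_res
      (PySem.List.pyRange (i + 1) maxMachines 1).foldl
        (fun fr j =>
          let total := pvFetchA reliability rel j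
          let res := total * ((PySem.List.min? (PySem.List.slice rel none (some j)) (fun x => x)).getD 0)
          if fr < res then res else fr)
        full_res)
    0

-- ===== PORT B =====
def maximumClusterQuality_alt (speed : List Int) (reliability : List Int) (maxMachines : Int) : Int :=
  if maxMachines ≤ 0 then 0
  else
    (PySem.List.slice (PySem.List.sorted reliability (fun x => x) true) none (some maxMachines)).foldl
      (fun best r => max best (r * r)) 0

-- ===== PRECONDITION & SPEC =====
-- Pre_ excludes exactly the inputs on which A raises IndexError (rel[i] with i ≥ len(reliability)).
def Pre_maximumClusterQuality (speed : List Int) (reliability : List Int) (maxMachines : Int) : Prop :=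
  maxMachines ≤ (reliability.length : Int)
instance (speed : List Int) (reliability : List Int) (maxMachines : Int) : Decidable (Pre_maximumClusterQuality speed reliability maxMachines) := by unfold Pre_maximumClusterQuality; infer_instance

def pvWitness_maximumClusterQuality : List Int × List Int × Int := ([], [3, -1, 2], 2)

-- On maxMachines > len(reliability) A raises IndexError; B returns the max square over all reliabilities (0 if the list is empty).
def Raises_maximumClusterQuality (speed : List Int) (reliability : List Int) (maxMachines : Int) : Prop :=
  (reliability.length : Int) < maxMachines
instance (speed : List Int) (reliability : List Int) (maxMachines : Int) : Decidable (Raises_maximumClusterQuality speed reliability maxMachines) := by unfold Raises_maximumClusterQuality; infer_instance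
def pvRaiseWitness_maximumClusterQuality : List Int × List Int × Int := ([], [2, -3], 5)
def pvRaiseWitnessOut_maximumClusterQuality : Int := 9

def Spec_maximumClusterQuality (speed : List Int) (reliability : List Int) (maxMachines : Int) (out : Int) : Prop := out = maximumClusterQuality_alt speed reliability maxMachines
instance (speed : List Int) (reliability : List Int) (maxMachines : Int) (out : Int) : Decidable (Spec_maximumClusterQuality speed reliability maxMachines out) := by unfold Spec_maximumClusterQuality; infer_instance

-- ===== CLAIM (what is proved, stated in full; the proofs are below) =====
def Claim_equal_maximumClusterQuality : Prop := ∀ (speed : List Int) (reliability : List Int) (maxMachines : Int), Dom_maximumClusterQuality speed reliability maxMachines → Pre_maximumClusterQuality speed reliability maxMachines → Spec_maximumClusterQuality speed reliability maxMachines (maximumClusterQuality speed reliability maxMachines)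
def Claim_raises_maximumClusterQuality : Prop := (∀ (speed : List Int) (reliability : List Int) (maxMachines : Int), Dom_maximumClusterQuality speed reliability maxMachines → Raises_maximumClusterQuality speed reliability maxMachines → ¬ Pre_maximumClusterQuality speed reliability maxMachines) ∧ (Dom_maximumClusterQuality (pvRaiseWitness_maximumClusterQuality.1) (pvRaiseWitness_maximumClusterQuality.2.1) (pvRaiseWitness_maximumClusterQuality.2.2) ∧ Raises_maximumClusterQuality (pvRaiseWitness_maximumClusterQuality.1) (pvRaiseWitness_maximumClusterQuality.2.1) (pvRaiseWitness_maximumClusterQuality.2.2) ∧ maximumClusterQuality_alt (pvRaiseWitness_maximumClusterQuality.1) (pvRaiseWitness_maximumClusterQuality.2.1) (pvRaiseWitness_maximumClusterQuality.2.2) = pvRaiseWitnessOut_maximumClusterQuality)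

-- ===== LEMMAS AND PROOFS =====

-- reliability[reliability.index(x)] = x for x ∈ reliability
lemma pvFetch_eq {l : List Int} {x : Int} (hx : x ∈ l) :
    PySem.List.pyGetD l (((PySem.List.index? l x).getD 0 : Nat) : Int) 0 = x := by
  have hs : (PySem.List.index? l x).isSome := (PySem.List.index?_isSome_iff l x).2 hx
  obtain ⟨k, hk⟩ := Option.isSome_iff_exists.1 hs
  obtain ⟨hlt, hget, -⟩ := PySem.List.getElem_of_index?_eq_some hk
  rw [hk]
  simp [PySem.List.pyGetD_natCast, List.getD_eq_getElem?_getD, List.getElem?_eq_getElem hlt, hget]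

-- A's 'if full_res < res then res else full_res' is a running max
lemma pvIfMax (a b : Int) : (if a < b then b else a) = max a b := by omega

lemma pvFoldlFlat (h : Int → List Int) (l : List Int) (a : Int) :
    (l.flatMap h).foldl max a = l.foldl (fun acc i => (h i).foldl max acc) a := by
  induction l generalizing a with
  | nil => rfl
  | cons x t ih => simp [List.flatMap_cons, List.foldl_append, ih]

-- A's two candidate kinds and the flattened candidate list
def pvC1 (reliability rel : List Int) (i : Int) : Int :=
  pvFetchA reliability rel i * PySem.List.pyGetD rel i 0
def pvC2 (reliability rel : List Int) (j : Int) : Int :=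
  pvFetchA reliability rel j * ((PySem.List.min? (PySem.List.slice rel none (some j)) (fun x => x)).getD 0)
def pvLA (reliability rel : List Int) (mm : Int) : List Int :=
  (PySem.List.pyRange 0 mm 1).flatMap
    (fun i => pvC1 reliability rel i :: (PySem.List.pyRange (i + 1) mm 1).map (pvC2 reliability rel))

-- A is the running max over its flattened candidate list
lemma A_flat (speed reliability : List Int) (mm : Int) :
    maximumClusterQuality speed reliability mm
      = (pvLA reliability (PySem.List.sorted reliability (fun x => x) true) mm).foldl max 0 := by
  unfold maximumClusterQuality pvLA
  rw [pvFoldlFlat]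
  simp only [pvIfMax, List.foldl_cons, List.foldl_map, pvC1, pvC2]

lemma pvMain (speed reliability : List Int) (mm : Int) (hpre : mm ≤ (reliability.length : Int)) :
    maximumClusterQuality speed reliability mm = maximumClusterQuality_alt speed reliability mm := by
  set rel := PySem.List.sorted reliability (fun x => x) true with hrel
  have hlen : rel.length = reliability.length := PySem.List.length_sorted ..
  by_cases hmm : mm ≤ 0
  · rw [A_flat]
    unfold maximumClusterQuality_alt pvLA
    rw [PySem.List.pyRange_one_eq_nil (by omega)]
    simp [hmm]
  replace hmm : 0 < mm := by omega
  have hkn : mm.toNat ≤ rel.length := by omega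
  set T := rel.take mm.toNat with hT
  have hTlen : T.length = mm.toNat := by simp [hT]; omega
  have hBval : maximumClusterQuality_alt speed reliability mm
      = T.foldl (fun best r => max best (r * r)) 0 := by
    unfold maximumClusterQuality_alt
    rw [if_neg (by omega), ← hrel, PySem.List.slice_to _ (by omega), ← hT]
  have hmemT : ∀ n : Nat, n < mm.toNat → rel.getD n 0 ∈ T := by
    intro n h
    have h1 : n < rel.length := by omega
    have h2 : T[n]'(by omega) = rel[n]'h1 := List.getElem_take
    have h3 : rel.getD n 0 = rel[n]'h1 := List.getD_eq_getElem rel 0 h1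
    rw [h3, ← h2]; exact List.getElem_mem _
  have hrelmem : ∀ n : Nat, n < mm.toNat → rel.getD n 0 ∈ reliability := by
    intro n h
    have h1 : n < rel.length := by omega
    rw [List.getD_eq_getElem rel 0 h1]
    exact (PySem.List.mem_sorted ..).1 (List.getElem_mem _)
  have hv1 : ∀ n : Nat, n < mm.toNat →
      pvC1 reliability rel (n : Int) = rel.getD n 0 * rel.getD n 0 := by
    intro n h
    unfold pvC1 pvFetchA
    have hin : PySem.List.pyGetD rel ((n:Nat) : Int) 0 = rel.getD n 0 := PySem.List.pyGetD_natCast ..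
    rw [hin, pvFetch_eq (hrelmem n h)]
  have hv2 : ∀ n : Nat, 1 ≤ n → n < mm.toNat →
      ∃ m ∈ T, pvC2 reliability rel (n : Int) = rel.getD n 0 * m := by
    intro n h1 h
    have hsl : PySem.List.slice rel none (some (n : Int)) = rel.take n :=
      by rw [PySem.List.slice_to _ (by omega)]; simp
    have hne : rel.take n ≠ [] := by
      have : (rel.take n).length = n := by simp; omega
      intro hh; rw [hh] at this; simp at this; omega
    obtain ⟨m, hm⟩ : ∃ m, PySem.List.min? (rel.take n) (fun x => x) = some m := by
      cases hh : PySem.List.min? (rel.take n) (fun x => x) with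
      | none => exact absurd ((PySem.List.min?_eq_none_iff ..).1 hh) hne
      | some m => exact ⟨m, rfl⟩
    have hmT : m ∈ T := by
      have hmm' := PySem.List.min?_mem hm
      have h2 : rel.take n = T.take n := by
        rw [hT, List.take_take]; congr 1; omega
      exact List.mem_of_mem_take (h2 ▸ hmm')
    refine ⟨m, hmT, ?_⟩
    unfold pvC2 pvFetchA
    have hin : PySem.List.pyGetD rel ((n:Nat) : Int) 0 = rel.getD n 0 := PySem.List.pyGetD_natCast ..
    rw [hsl, hm, hin, pvFetch_eq (hrelmem n h)]
    rfl
  rw [A_flat, hBval]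
  set RB := T.foldl (fun best r => max best (r * r)) 0 with hRB
  have hsqB : ∀ x ∈ T, x * x ≤ RB :=
    (PySem.List.le_foldl_max_int T (fun r => r * r) 0).2
  have hRB0 : (0:Int) ≤ RB := (PySem.List.le_foldl_max_int T (fun r => r * r) 0).1
  set LA := pvLA reliability rel mm with hLA
  have hcand : ∀ y ∈ LA, y ≤ RB := by
    intro y hy
    rw [hLA] at hy
    unfold pvLA at hy
    obtain ⟨i, hi, hyi⟩ := List.mem_flatMap.1 hy
    obtain ⟨h0i, hilt⟩ := (PySem.List.mem_pyRange_one ..).1 hi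
    rcases List.mem_cons.1 hyi with h | h
    · subst h
      rw [← Int.toNat_of_nonneg h0i, hv1 i.toNat (by omega)]
      exact hsqB _ (hmemT i.toNat (by omega))
    · obtain ⟨j, hj, hyj⟩ := List.mem_map.1 h
      obtain ⟨h1j, hjlt⟩ := (PySem.List.mem_pyRange_one ..).1 hj
      obtain ⟨m, hmT, heq⟩ := hv2 j.toNat (by omega) (by omega)
      rw [Int.toNat_of_nonneg (by omega)] at heq
      subst hyj; rw [heq]
      have ha := hsqB _ (hmemT j.toNat (by omega))
      have hb := hsqB m hmT
      nlinarith [sq_nonneg (rel.getD j.toNat 0 - m)]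
  have hRA_le : LA.foldl max 0 ≤ RB := by
    rcases PySem.List.foldl_max_mem LA 0 with h | h
    · rw [h]; exact hRB0
    · exact hcand _ h
  have hRB_le : RB ≤ LA.foldl max 0 := by
    have hmono := PySem.List.le_foldl_max LA 0
    have hmapeq : List.foldl (fun best r => max best (r * r)) 0 T
        = List.foldl max 0 (T.map (fun r => r * r)) := List.foldl_map.symm
    rcases PySem.List.foldl_max_mem (T.map (fun r => r * r)) 0 with h | h
    · rw [hRB, hmapeq, h]; exact hmono.1
    · obtain ⟨r, hrT, hr⟩ := List.mem_map.1 h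
      obtain ⟨n, hn, hrn⟩ := List.getElem_of_mem hrT
      have hnm : n < mm.toNat := by omega
      have hrget : rel.getD n 0 = r := by
        have h1 : n < rel.length := by omega
        have h2 : T[n]'hn = rel[n]'h1 := List.getElem_take
        rw [List.getD_eq_getElem rel 0 h1, ← h2, hrn]
      have hc1 : pvC1 reliability rel (n : Int) = r * r := by
        rw [hv1 n hnm, hrget]
      have hmemLA : pvC1 reliability rel (n : Int) ∈ LA := by
        rw [hLA]; unfold pvLA
        exact List.mem_flatMap.2 ⟨(n:Int),
          (PySem.List.mem_pyRange_one ..).2 ⟨by omega, by omega⟩, List.mem_cons_self ..⟩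
      calc RB = (T.map (fun r => r * r)).foldl max 0 := by rw [hRB, hmapeq]
        _ = r * r := hr ▸ rfl
        _ ≤ _ := hc1 ▸ hmono.2 _ hmemLA
  omega

-- ===== VERDICT (by name: the statement is the Claim_ definition above) =====
theorem maximumClusterQuality_spec : Claim_equal_maximumClusterQuality := by
  intro speed reliability maxMachines _ hpre
  unfold Spec_maximumClusterQuality
  exact pvMain speed reliability maxMachines hpre

@[simp]
theorem maximumClusterQuality_raises : Claim_raises_maximumClusterQuality := by
  unfold Claim_raises_maximumClusterQuality
  constructor
  · intro _ _ _ _ hr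
    unfold Raises_maximumClusterQuality at hr
    unfold Pre_maximumClusterQuality
    omega
  · exact ⟨by decide, by decide, by decide⟩
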